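-- pv_equiv track=rewrite | github.com/avdhutsalunkhe/sanskrit-password-manager | Project12/sanskrit-password-manager/password_generator.py | _get_character_types
-- ===== SOURCE A (Python) =====
-- def _get_character_types(password):
--     types = []
--     if any(c.islower() for c in password):
--         types.append('lowercase')
--     if any(c.isupper() for c in password):
--         types.append('uppercase')
--     if any(c.isdigit() for c in password):
--         types.append('digits')
--     if any(not c.isalnum() for c in password):
--         types.append('symbols')
--     return types
-- ===== SOURCE B (Python) =====
-- def _get_character_types(password):
--     has_lower = has_upper = has_digit = has_symbol = False
--     for c in password:
--         has_lower = has_lower or c.islower()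
--         has_upper = has_upper or c.isupper()
--         has_digit = has_digit or c.isdigit()
--         has_symbol = has_symbol or not c.isalnum()
--     return [name for flag, name in ((has_lower, 'lowercase'),
--                                     (has_upper, 'uppercase'),
--                                     (has_digit, 'digits'),
--                                     (has_symbol, 'symbols')) if flag]
-- ===== Notes on version B (the rewrite author's own statement) =====
-- stated objective: alternative
-- what changed: Replaces four separate any() generator scans of the password with a single pass maintaining four boolean flags, then emits the category names from the flags in the fixed order.
import Mathlib
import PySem

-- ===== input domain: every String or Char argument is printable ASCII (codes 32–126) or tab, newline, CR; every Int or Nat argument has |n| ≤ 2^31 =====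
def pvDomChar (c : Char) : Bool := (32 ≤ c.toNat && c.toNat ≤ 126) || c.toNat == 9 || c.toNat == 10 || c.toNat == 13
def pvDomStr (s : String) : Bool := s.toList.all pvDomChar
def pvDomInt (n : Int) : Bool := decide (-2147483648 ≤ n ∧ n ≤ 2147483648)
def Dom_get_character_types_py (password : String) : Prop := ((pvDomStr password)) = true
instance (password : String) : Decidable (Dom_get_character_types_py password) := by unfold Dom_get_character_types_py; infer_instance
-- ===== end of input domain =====

-- B replaces A's four any() scans by one pass maintaining four boolean flags (alternative decomposition, same output).

-- ===== PORT A =====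
-- literal transliteration: types = [], four `if any(...)` appends, in order
def get_character_types_py (password : String) : List String :=
  let cs := password.toList
  let types : List String := []
  let types := if cs.any (fun c => PySem.Chars.islower c) then types ++ ["lowercase"] else types
  let types := if cs.any (fun c => PySem.Chars.isupper c) then types ++ ["uppercase"] else types
  let types := if cs.any (fun c => PySem.Chars.isdigit c) then types ++ ["digits"] else types
  let types := if cs.any (fun c => !PySem.Chars.isalnum c) then types ++ ["symbols"] else types
  types

-- ===== PORT B =====
-- single fold carrying (has_lower, has_upper, has_digit, has_symbol), then build from the flags
def get_character_types_py_alt (password : String) : List String :=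
  let fl := password.toList.foldl
    (fun (s : Bool × Bool × Bool × Bool) c =>
      (s.1 || PySem.Chars.islower c,
       s.2.1 || PySem.Chars.isupper c,
       s.2.2.1 || PySem.Chars.isdigit c,
       s.2.2.2 || !PySem.Chars.isalnum c))
    (false, false, false, false)
  ([(fl.1, "lowercase"), (fl.2.1, "uppercase"), (fl.2.2.1, "digits"), (fl.2.2.2, "symbols")].filter
      (fun p => p.1)).map (fun p => p.2)

-- ===== PRECONDITION & SPEC =====
def Spec_get_character_types_py (password : String) (out : List String) : Prop := out = get_character_types_py_alt password
instance (password : String) (out : List String) : Decidable (Spec_get_character_types_py password out) := by unfold Spec_get_character_types_py; infer_instance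

-- ===== CLAIM (what is proved, stated in full; the proofs are below) =====
def Claim_equal_get_character_types_py : Prop := ∀ (password : String), Dom_get_character_types_py password → Spec_get_character_types_py password (get_character_types_py password)

-- ===== LEMMAS AND PROOFS =====

-- the fold computes exactly the four any-scans (accumulator generalized)
theorem pv_fold_flags (cs : List Char) (a b c d : Bool) :
    cs.foldl
      (fun (s : Bool × Bool × Bool × Bool) ch =>
        (s.1 || PySem.Chars.islower ch,
         s.2.1 || PySem.Chars.isupper ch,
         s.2.2.1 || PySem.Chars.isdigit ch,
         s.2.2.2 || !PySem.Chars.isalnum ch)) (a, b, c, d)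
    = (a || cs.any (fun x => PySem.Chars.islower x),
       b || cs.any (fun x => PySem.Chars.isupper x),
       c || cs.any (fun x => PySem.Chars.isdigit x),
       d || cs.any (fun x => !PySem.Chars.isalnum x)) := by
  induction cs generalizing a b c d with
  | nil => simp
  | cons x xs ih => simp [List.foldl, ih, Bool.or_assoc]

-- ===== VERDICT (by name: the statement is the Claim_ definition above) =====
theorem get_character_types_py_spec : Claim_equal_get_character_types_py := by
  intro password _
  unfold Spec_get_character_types_py get_character_types_py get_character_types_py_alt
  rw [pv_fold_flags]
  simp only [Bool.false_or]
  by_cases h1 : password.toList.any (fun x => PySem.Chars.islower x) <;>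
  by_cases h2 : password.toList.any (fun x => PySem.Chars.isupper x) <;>
  by_cases h3 : password.toList.any (fun x => PySem.Chars.isdigit x) <;>
  by_cases h4 : password.toList.any (fun x => !PySem.Chars.isalnum x) <;>
  simp [h1, h2, h3, h4]
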